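-- pv_equiv track=rewrite | github.com/robertball/Beginners-Guide-Data-Science | Chapter_9_Natural_Language_Processing/n_gram_production.py | get_collocations
-- ===== SOURCE A (Python) =====
-- def add_collocation(collocation, collocation_length, results):
--     if collocation_length not in results:
--         results[collocation_length] = dict()
--     if collocation not in results[collocation_length]:
--         results[collocation_length][collocation] = 1
--     else:
--         results[collocation_length][collocation] += 1
--
-- def get_collocations(text):
--     results = dict()
--     words = text.split()
--     if len(words) == 0:
--         return
--     for i in range(1, len(words)):
--         beg = 0
--         end = beg + i
--         while end <= len(words):
--             collocation = " ".join(words[beg:end])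
--             add_collocation(collocation, i, results)
--             beg += 1
--             end += 1
--     return results
-- ===== SOURCE B (Python) =====
-- def get_collocations(text):
--     words = text.split()
--     if not words:
--         return None
--     results = {}
--     grams = words  # length-1 grams, indexed by start position
--     for i in range(1, len(words)):
--         counts = {}
--         for g in grams:
--             counts[g] = counts.get(g, 0) + 1
--         results[i] = counts
--         grams = [g + " " + w for g, w in zip(grams, words[i:])]
--     return results
-- ===== Notes on version B (the rewrite author's own statement) =====
-- stated objective: alternative
-- what changed: B is a dynamic program over ascending lengths: it keeps the current level's grams as a list indexed by start position and builds the next level by zipping it with the remaining words and appending one word to each gram, so no window is ever re-sliced or re-joined and A's shared nested dict, add_collocation helper and beg/end two-pointer while-loop disappear.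
import Mathlib
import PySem

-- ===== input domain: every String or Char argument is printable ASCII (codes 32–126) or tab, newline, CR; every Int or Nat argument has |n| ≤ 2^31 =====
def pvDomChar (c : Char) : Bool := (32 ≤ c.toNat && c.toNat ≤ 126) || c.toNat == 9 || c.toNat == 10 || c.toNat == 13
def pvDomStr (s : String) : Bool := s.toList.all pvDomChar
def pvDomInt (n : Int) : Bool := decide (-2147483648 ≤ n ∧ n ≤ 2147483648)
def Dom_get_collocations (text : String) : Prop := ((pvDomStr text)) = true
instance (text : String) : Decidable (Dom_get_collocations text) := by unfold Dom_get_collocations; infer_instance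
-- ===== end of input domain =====

-- B is a dynamic program over ascending lengths: each level's grams are obtained by appending the
-- next word to the previous level's grams, so no window is ever re-sliced or re-joined; same result.

-- ===== PORT A =====
def addCollocation (collocation : String) (collocationLength : Int)
    (results : PySem.Dict Int (PySem.Dict String Int)) : PySem.Dict Int (PySem.Dict String Int) :=
  let results :=
    if results.contains collocationLength = false then
      results.insert collocationLength PySem.Dict.empty
    else results
  if (results.getD collocationLength PySem.Dict.empty).contains collocation = false then
    results.modify collocationLength PySem.Dict.empty (fun d => d.insert collocation 1)
  else
    results.modify collocationLength PySem.Dict.empty (fun d => d.modify collocation 0 (· + 1))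

def collocWhile (words : List String) (i : Int) (beg fin : Int)
    (results : PySem.Dict Int (PySem.Dict String Int)) : PySem.Dict Int (PySem.Dict String Int) :=
  if fin ≤ (words.length : Int) then
    collocWhile words i (beg + 1) (fin + 1)
      (addCollocation (PySem.Str.join " " (PySem.List.slice words (some beg) (some fin))) i results)
  else results
termination_by ((words.length : Int) + 1 - fin).toNat
decreasing_by omega

def get_collocations (text : String) : Option (List (Int × List (String × Int))) :=
  let results : PySem.Dict Int (PySem.Dict String Int) := PySem.Dict.empty
  let words := PySem.Str.split₀ text
  if words.length = 0 then none
  else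
    let results := (PySem.List.pyRange 1 (words.length : Int) 1).foldl
      (fun results i => collocWhile words i 0 (0 + i) results) results
    some (results.items.map (fun p => (p.1, p.2.items)))

-- ===== PORT B =====
-- 'counts[g] = counts.get(g, 0) + 1' over the current level's grams
def countGrams (grams : List String) : PySem.Dict String Int :=
  grams.foldl (fun counts g => counts.insert g (counts.getD g 0 + 1)) PySem.Dict.empty

-- '[g + " " + w for g, w in zip(grams, words[i:])]' ; g + " " + w is exactly " ".join([g, w])
def extendGrams (grams : List String) (words : List String) (i : Int) : List String :=
  (grams.zip (PySem.List.slice words (some i) none)).map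
    (fun p => PySem.Str.join " " [p.1, p.2])

def get_collocations_alt (text : String) : Option (List (Int × List (String × Int))) :=
  let words := PySem.Str.split₀ text
  if words.length = 0 then none
  else
    let st := (PySem.List.pyRange 1 (words.length : Int) 1).foldl
      (fun (st : PySem.Dict Int (PySem.Dict String Int) × List String) i =>
        (st.1.insert i (countGrams st.2), extendGrams st.2 words i))
      (PySem.Dict.empty, words)
    some (st.1.items.map (fun p => (p.1, p.2.items)))

-- ===== PRECONDITION & SPEC =====
def Spec_get_collocations (text : String) (out : Option (List (Int × List (String × Int)))) : Prop := out = get_collocations_alt text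
instance (text : String) (out : Option (List (Int × List (String × Int)))) : Decidable (Spec_get_collocations text out) := by unfold Spec_get_collocations; infer_instance

-- ===== CLAIM (what is proved, stated in full; the proofs are below) =====
def Claim_equal_get_collocations : Prop := ∀ (text : String), Dom_get_collocations text → Spec_get_collocations text (get_collocations text)

-- ===== LEMMAS AND PROOFS =====

-- the length-i grams of `words` in start order (what both ports' loops enumerate)
def collocList (words : List String) (i : Int) : List String :=
  (PySem.List.pyRange 0 ((words.length : Int) - i + 1) 1).map (fun b =>
    PySem.Str.join " " (PySem.List.slice words (some b) (some (b + i))))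

-- ---- A side: the while/for loops build the canonical foldl-insert dict ----

theorem modify_eq_insert_outer (d : PySem.Dict Int (PySem.Dict String Int)) (k : Int)
    (f : PySem.Dict String Int → PySem.Dict String Int) :
    d.modify k PySem.Dict.empty f = d.insert k (f (d.getD k PySem.Dict.empty)) := rfl

theorem modify_eq_insert_inner (d : PySem.Dict String Int) (k : String) (f : Int → Int) :
    d.modify k 0 f = d.insert k (f (d.getD k 0)) := rfl

theorem add_on_insert (R : PySem.Dict Int (PySem.Dict String Int)) (i : Int)
    (d : PySem.Dict String Int) (c : String) :
    addCollocation c i (R.insert i d) = R.insert i (d.insert c (d.getD c 0 + 1)) := by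
  unfold addCollocation
  simp only [PySem.Dict.contains_insert_self, Bool.true_eq_false, if_false,
    PySem.Dict.getD_insert_self, modify_eq_insert_outer, PySem.Dict.insert_insert_self]
  by_cases hc : d.contains c = false
  · rw [if_pos hc]; simp [PySem.Dict.getD_of_not_contains, hc]
  · rw [if_neg hc, modify_eq_insert_inner]

theorem foldl_add_insert (cs : List String) :
    ∀ (R : PySem.Dict Int (PySem.Dict String Int)) (i : Int) (d : PySem.Dict String Int),
    cs.foldl (fun r c => addCollocation c i r) (R.insert i d) =
      R.insert i (cs.foldl (fun d s => d.insert s (d.getD s 0 + 1)) d) := by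
  induction cs with
  | nil => intro R i d; rfl
  | cons c cs ih =>
    intro R i d
    simp only [List.foldl_cons, add_on_insert]
    exact ih R i _

theorem foldl_add_fresh (c : String) (cs : List String)
    (R : PySem.Dict Int (PySem.Dict String Int)) (i : Int) (h : R.contains i = false) :
    (c :: cs).foldl (fun r c => addCollocation c i r) R = R.insert i (countGrams (c :: cs)) := by
  have hstep : addCollocation c i R = R.insert i (PySem.Dict.empty.insert c 1) := by
    unfold addCollocation
    simp only [h, if_pos, PySem.Dict.getD_insert_self, PySem.Dict.contains_empty,
      modify_eq_insert_outer, PySem.Dict.insert_insert_self]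
  simp only [List.foldl_cons, hstep, foldl_add_insert]
  unfold countGrams
  simp only [List.foldl_cons, PySem.Dict.getD_empty]
  norm_num

theorem collocWhile_eq (words : List String) (i : Int) :
    ∀ (k : Nat) (beg : Int), (((words.length : Int) + 1 - (beg + i)).toNat = k) →
    ∀ (R : PySem.Dict Int (PySem.Dict String Int)),
    collocWhile words i beg (beg + i) R =
      ((PySem.List.pyRange beg ((words.length : Int) - i + 1) 1).map (fun b =>
        PySem.Str.join " " (PySem.List.slice words (some b) (some (b + i))))).foldl
        (fun r c => addCollocation c i r) R := by
  intro k
  induction k with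
  | zero =>
    intro beg hk R
    have hgt : ¬ (beg + i ≤ (words.length : Int)) := by omega
    rw [collocWhile, if_neg hgt, PySem.List.pyRange_one_eq_nil (by omega)]
    rfl
  | succ k ih =>
    intro beg hk R
    by_cases hle : beg + i ≤ (words.length : Int)
    · rw [collocWhile, if_pos hle]
      have hlt : beg < (words.length : Int) - i + 1 := by omega
      rw [PySem.List.pyRange_one_cons hlt]
      simp only [List.map_cons, List.foldl_cons]
      have : beg + i + 1 = (beg + 1) + i := by ring
      rw [this]
      exact ih (beg + 1) (by omega) _
    · rw [collocWhile, if_neg hle, PySem.List.pyRange_one_eq_nil (by omega)]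
      rfl

theorem collocWhile_insert (words : List String) (i : Int)
    (R : PySem.Dict Int (PySem.Dict String Int)) (h : R.contains i = false)
    (hne : 0 < (words.length : Int) - i + 1) :
    collocWhile words i 0 (0 + i) R = R.insert i (countGrams (collocList words i)) := by
  rw [collocWhile_eq words i (((words.length : Int) + 1 - (0 + i)).toNat) 0 rfl R]
  unfold collocList
  rw [PySem.List.pyRange_one_cons hne]
  simp only [List.map_cons]
  exact foldl_add_fresh _ _ R i h

theorem outer_fold (words : List String) :
    ∀ (is : List Int) (R : PySem.Dict Int (PySem.Dict String Int)),
    is.Nodup → (∀ j ∈ is, R.contains j = false) →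
    (∀ j ∈ is, 0 < (words.length : Int) - j + 1) →
    is.foldl (fun R i => collocWhile words i 0 (0 + i) R) R =
      is.foldl (fun R i => R.insert i (countGrams (collocList words i))) R := by
  intro is
  induction is with
  | nil => intro R _ _ _; rfl
  | cons i is ih =>
    intro R hnd hfresh hne
    simp only [List.foldl_cons]
    rw [collocWhile_insert words i R (hfresh i (List.mem_cons_self ..)) (hne i (List.mem_cons_self ..))]
    apply ih
    · exact hnd.of_cons
    · intro j hj
      rw [PySem.Dict.contains_insert]
      have hji : j ≠ i := by
        intro h; subst h; exact (List.nodup_cons.mp hnd).1 hj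
      simp [hji, hfresh j (List.mem_cons_of_mem _ hj)]
    · intro j hj; exact hne j (List.mem_cons_of_mem _ hj)

-- ---- B side: extending grams word by word reproduces the length-(i+1) grams ----

-- " ".join of a nonempty snoc list: join (xs ++ [y]) = join [join xs, y]
theorem chars_join_snoc (sep y : List Char) (x : List Char) (xs : List (List Char)) :
    PySem.Chars.join sep ((x :: xs) ++ [y]) =
      PySem.Chars.join sep (x :: xs) ++ sep ++ y := by
  induction xs generalizing x with
  | nil => simp [PySem.Chars.join_cons_cons, PySem.Chars.join_singleton]
  | cons z zs ih =>
    simp only [List.cons_append, PySem.Chars.join_cons_cons]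
    rw [← List.cons_append, ih z]
    simp [List.append_assoc]

-- appending the next word to the length-i gram at start b gives the length-(i+1) gram at b
theorem gram_extend (words : List String) (b i : Nat) (hi : 1 ≤ i)
    (hbi : b + i < words.length) :
    PySem.Str.join " " [PySem.Str.join " " (PySem.List.slice words (some (b : Int)) (some ((b : Int) + (i : Int)))),
      words[b + i]] =
    PySem.Str.join " " (PySem.List.slice words (some (b : Int)) (some ((b : Int) + ((i : Int) + 1)))) := by
  have h1 : ((i : Int) + 1) = ((i + 1 : Nat) : Int) := by push_cast; ring
  rw [h1, PySem.List.slice_natCast_add, PySem.List.slice_natCast_add]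
  have hsnoc : (words.drop b).take (i + 1) = (words.drop b).take i ++ [words[b + i]] := by
    rw [List.take_add_one]
    have : (words.drop b)[i]? = some words[b + i] := by
      rw [List.getElem?_drop, List.getElem?_eq_getElem (by omega)]
    simp [this]
  rw [hsnoc]
  apply String.toList_inj.mp
  have hne : (words.drop b).take i ≠ [] := by
    intro h
    have := congrArg List.length h
    simp at this
    omega
  obtain ⟨x, xs, hx⟩ := List.exists_cons_of_ne_nil hne
  rw [hx]
  simp only [PySem.Str.toList_join, List.map_append, List.map_cons, List.map_nil]
  rw [chars_join_snoc]
  simp [PySem.Chars.join_cons_cons, PySem.Chars.join_singleton]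

-- zipping level i's grams with words[i:] yields level (i+1)'s grams
theorem extend_collocList (words : List String) (i : Nat) (hi : 1 ≤ i) :
    ∀ (k : Nat) (a : Nat), ((words.length : Int) - i - a).toNat = k →
    (((PySem.List.pyRange (a : Int) ((words.length : Int) - (i : Int) + 1) 1).map (fun b =>
        PySem.Str.join " " (PySem.List.slice words (some b) (some (b + (i : Int)))))).zip
      (words.drop (a + i))).map (fun p => PySem.Str.join " " [p.1, p.2]) =
    (PySem.List.pyRange (a : Int) ((words.length : Int) - ((i : Int) + 1) + 1) 1).map (fun b =>
        PySem.Str.join " " (PySem.List.slice words (some b) (some (b + ((i : Int) + 1))))) := by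
  intro k
  induction k with
  | zero =>
    intro a ha
    have hdrop : words.drop (a + i) = [] := List.drop_eq_nil_of_le (by omega)
    rw [hdrop, List.zip_nil_right, PySem.List.pyRange_one_eq_nil (by omega)]
    simp
  | succ k ih =>
    intro a ha
    have hlt : a + i < words.length := by omega
    rw [List.drop_eq_getElem_cons hlt,
      PySem.List.pyRange_one_cons (a := (a : Int)) (by omega),
      PySem.List.pyRange_one_cons (a := (a : Int)) (by omega)]
    simp only [List.map_cons, List.zip_cons_cons]
    refine List.cons_eq_cons.mpr ⟨?_, ?_⟩
    · exact gram_extend words a i hi hlt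
    · have h3 := ih (a + 1) (by omega)
      rw [show a + 1 + i = a + i + 1 from by omega] at h3
      rw [show ((a : Int) + 1) = ((a + 1 : Nat) : Int) from by push_cast; ring]
      exact h3

theorem extendGrams_collocList (words : List String) (i : Nat) (hi : 1 ≤ i) :
    extendGrams (collocList words (i : Int)) words (i : Int) = collocList words ((i : Int) + 1) := by
  unfold extendGrams collocList
  rw [PySem.List.slice_from_natCast]
  have := extend_collocList words i hi ((words.length : Int) - i - 0).toNat 0 rfl
  simpa using this

-- the length-1 grams are the words themselves
theorem collocList_one (words : List String) :
    collocList words 1 = words := by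
  unfold collocList
  have key : ∀ (k : Nat) (a : Nat), (words.length - a = k) →
      (PySem.List.pyRange (a : Int) ((words.length : Int) - 1 + 1) 1).map (fun b =>
        PySem.Str.join " " (PySem.List.slice words (some b) (some (b + 1)))) = words.drop a := by
    intro k
    induction k with
    | zero =>
      intro a ha
      rw [PySem.List.pyRange_one_eq_nil (by omega), List.drop_eq_nil_of_le (by omega)]
      simp
    | succ k ih =>
      intro a ha
      have hlt : a < words.length := by omega
      rw [PySem.List.pyRange_one_cons (a := (a : Int)) (by omega),
        List.drop_eq_getElem_cons hlt]
      simp only [List.map_cons]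
      refine List.cons_eq_cons.mpr ⟨?_, ?_⟩
      · have h1 : ((a : Int) + 1) = ((a : Int) + ((1 : Nat) : Int)) := by norm_num
        rw [h1, PySem.List.slice_natCast_add, List.drop_eq_getElem_cons hlt]
        simp only [List.take_succ_cons, List.take_zero]
        apply String.toList_inj.mp
        simp [PySem.Str.toList_join, PySem.Chars.join_singleton]
      · have h1 : ((a : Int) + 1) = ((a + 1 : Nat) : Int) := by push_cast; ring
        rw [h1]
        exact ih (a + 1) (by omega)
  simpa using key words.length 0 rfl

-- B's fold over the levels, with grams characterised, is the canonical foldl-insert dict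
theorem b_fold (words : List String) :
    ∀ (k : Nat) (i : Nat), 1 ≤ i → ((words.length : Int) - i).toNat = k →
    ∀ (R : PySem.Dict Int (PySem.Dict String Int)),
    ((PySem.List.pyRange (i : Int) (words.length : Int) 1).foldl
      (fun (st : PySem.Dict Int (PySem.Dict String Int) × List String) j =>
        (st.1.insert j (countGrams st.2), extendGrams st.2 words j))
      (R, collocList words (i : Int))).1 =
    (PySem.List.pyRange (i : Int) (words.length : Int) 1).foldl
      (fun R j => R.insert j (countGrams (collocList words j))) R := by
  intro k
  induction k with
  | zero =>
    intro i hi hk R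
    rw [PySem.List.pyRange_one_eq_nil (by omega)]
    rfl
  | succ k ih =>
    intro i hi hk R
    have hlt : (i : Int) < (words.length : Int) := by omega
    rw [PySem.List.pyRange_one_cons hlt]
    simp only [List.foldl_cons]
    rw [extendGrams_collocList words i hi]
    have h1 : ((i : Int) + 1) = ((i + 1 : Nat) : Int) := by push_cast; ring
    rw [h1]
    exact ih (i + 1) (by omega) (by omega) _

-- ===== VERDICT (by name: the statement is the Claim_ definition above) =====
theorem get_collocations_spec : Claim_equal_get_collocations := by
  intro text _
  unfold Spec_get_collocations get_collocations get_collocations_alt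
  set words := PySem.Str.split₀ text with hw
  by_cases h0 : words.length = 0
  · simp [h0]
  · simp only [h0, if_false]
    rw [outer_fold words (PySem.List.pyRange 1 (words.length : Int) 1) PySem.Dict.empty
      (PySem.List.nodup_pyRange_one 1 (words.length : Int))
      (fun j _ => PySem.Dict.contains_empty j)
      (fun j hj => by
        have := PySem.List.mem_pyRange_one.mp hj
        omega)]
    have hb := b_fold words ((words.length : Int) - 1).toNat 1 le_rfl rfl PySem.Dict.empty
    simp only [Nat.cast_one] at hb
    rw [collocList_one] at hb
    rw [hb]
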